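-- pv_equiv track=rewrite | github.com/CoinLQ/TripitakaPlatform | dmXadmin/auth.py | get_wrapped
-- ===== SOURCE A (Python) =====
-- def get_wrapped(name):
--     count = len(name)
--     chars = []
--     for i in range(count):
--         chars.append(name[i])
--         if (i + 1) % 3 == 0:
--             chars.append('<br />')
--     return ''.join(chars)
-- ===== SOURCE B (Python) =====
-- def get_wrapped(name):
--     parts = []
--     for i in range(0, len(name), 3):
--         chunk = name[i:i+3]
--         parts.append(chunk + '<br />' if len(chunk) == 3 else chunk)
--     return ''.join(parts)
-- ===== Notes on version B (the rewrite author's own statement) =====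
-- stated objective: simpler
-- what changed: Iterates over three-character chunks (range step 3 + slicing) and appends one '<br />' per full chunk, instead of A's per-character loop with a modulus test on the index.
import Mathlib
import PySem

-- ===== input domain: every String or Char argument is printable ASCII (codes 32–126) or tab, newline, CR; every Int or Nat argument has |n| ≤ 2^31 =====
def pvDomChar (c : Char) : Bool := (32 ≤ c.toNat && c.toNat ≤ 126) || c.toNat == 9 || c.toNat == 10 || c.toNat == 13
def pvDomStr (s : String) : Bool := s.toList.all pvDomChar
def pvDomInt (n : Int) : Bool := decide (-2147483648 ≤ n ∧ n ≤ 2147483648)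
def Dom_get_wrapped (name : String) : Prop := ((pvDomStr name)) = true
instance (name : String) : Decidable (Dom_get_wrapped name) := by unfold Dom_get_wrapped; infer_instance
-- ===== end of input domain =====

-- B iterates over three-character chunks (range step 3 + slicing), appending one '<br />'
-- per full chunk, instead of A's per-character loop with a modulus test; objective: simpler.

-- ===== PORT A =====
-- chars.append per loop iteration; '<br />' appended when (i+1) % 3 == 0; final ''.join
def get_wrapped (name : String) : String :=
  let cs := name.toList
  let count := cs.length
  let chars := (List.range count).foldl
    (fun (acc : List String) (i : Nat) =>
      let acc2 := acc ++ [String.ofList [cs[i]!]]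
      if (i + 1) % 3 == 0 then acc2 ++ ["<br />"] else acc2) []
  String.join chars

-- ===== PORT B =====
-- Source B: for i in range(0, len(name), 3): chunk = name[i:i+3]; append chunk (+ '<br />' iff full)
def get_wrapped_alt (name : String) : String :=
  let cs := name.toList
  let parts := (PySem.List.pyRange 0 cs.length 3).map (fun i =>
    let chunk := PySem.List.slice cs (some i) (some (i + 3))
    if chunk.length == 3 then String.ofList chunk ++ "<br />" else String.ofList chunk)
  String.join parts

-- ===== PRECONDITION & SPEC =====
def Spec_get_wrapped (name : String) (out : String) : Prop := out = get_wrapped_alt name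
instance (name : String) (out : String) : Decidable (Spec_get_wrapped name out) := by unfold Spec_get_wrapped; infer_instance

-- ===== CLAIM (what is proved, stated in full; the proofs are below) =====
def Claim_equal_get_wrapped : Prop := ∀ (name : String), Dom_get_wrapped name → Spec_get_wrapped name (get_wrapped name)

-- ===== LEMMAS AND PROOFS =====

-- common reference form: the wrapped character stream, three characters per step
def wrapCore : List Char → List Char
  | c1 :: c2 :: c3 :: rest => c1 :: c2 :: c3 :: ("<br />".toList ++ wrapCore rest)
  | rest => rest

-- per-element characterisation of A's chars list, indexed by the global position
def strsA : List Char → Nat → List String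
  | [], _ => []
  | c :: t, j => ([String.ofList [c]] ++ (if (j + 1) % 3 == 0 then ["<br />"] else [])) ++ strsA t (j + 1)

lemma foldA (suf pre : List Char) (acc : List String) :
    (List.range' pre.length suf.length).foldl
      (fun (acc : List String) (i : Nat) =>
        let acc2 := acc ++ [String.ofList [(pre ++ suf)[i]!]]
        if (i + 1) % 3 == 0 then acc2 ++ ["<br />"] else acc2) acc
      = acc ++ strsA suf pre.length := by
  induction suf generalizing pre acc with
  | nil => simp [strsA]
  | cons c t ih =>
    have hg : (pre ++ c :: t)[pre.length]! = c := by
      simp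
    have h2 := ih (pre ++ [c]) (if (pre.length + 1) % 3 == 0
        then acc ++ [String.ofList [c]] ++ ["<br />"] else acc ++ [String.ofList [c]])
    simp only [List.length_append, List.length_cons, List.append_assoc,
      List.singleton_append, List.length_nil, Nat.zero_add] at h2 ⊢
    simp only [List.range'_succ, List.foldl_cons, hg, strsA]
    by_cases h : (pre.length + 1) % 3 == 0 <;>
      simp only [h, if_true, if_false, Bool.false_eq_true] at h2 ⊢ <;>
      rw [h2] <;> simp

def charsA (t : List Char) (j : Nat) : List Char :=
  ((strsA t j).map String.toList).flatten

lemma charsA_eq_core : ∀ (n : Nat) (t : List Char), t.length ≤ n → ∀ j, j % 3 = 0 →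
    charsA t j = wrapCore t := by
  intro n
  induction n with
  | zero =>
    intro t ht j hj
    have : t = [] := by cases t <;> simp_all
    subst this; rfl
  | succ n ih =>
    intro t ht j hj
    match t with
    | [] => rfl
    | [a] =>
      have h1 : (j + 1) % 3 ≠ 0 := by omega
      simp [charsA, strsA, wrapCore, h1, String.toList_ofList]
    | [a, b] =>
      have h1 : (j + 1) % 3 ≠ 0 := by omega
      have h2 : (j + 2) % 3 ≠ 0 := by omega
      simp [charsA, strsA, wrapCore, h1, h2, String.toList_ofList]
    | a :: b :: c :: rest =>
      have h1 : (j + 1) % 3 ≠ 0 := by omega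
      have h2 : (j + 1 + 1) % 3 ≠ 0 := by omega
      have h3 : (j + 1 + 1 + 1) % 3 = 0 := by omega
      have hlen : rest.length ≤ n := by
        simp only [List.length_cons] at ht; omega
      have := ih rest hlen (j + 1 + 1 + 1) h3
      simp only [charsA, strsA, h3] at this ⊢
      simp_all [wrapCore, String.toList_ofList]

-- B side: the chunk taken at position 3*k, as its character stream
def chunkAt (cs : List Char) (k : Nat) : List Char :=
  List.take 3 (List.drop (3 * k) cs)

def pieceB (cs : List Char) (k : Nat) : List Char :=
  if (chunkAt cs k).length == 3 then chunkAt cs k ++ "<br />".toList else chunkAt cs k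

lemma pieceB_succ (a b c : Char) (rest : List Char) (k : Nat) :
    pieceB (a :: b :: c :: rest) (k + 1) = pieceB rest k := by
  have h : 3 * (k + 1) = (3 * k) + 1 + 1 + 1 := by omega
  simp [pieceB, chunkAt, h, List.drop_succ_cons]

lemma piecesB_eq_core : ∀ (n : Nat) (cs : List Char), cs.length ≤ n →
    ((List.range ((cs.length + 2) / 3)).map (pieceB cs)).flatten = wrapCore cs := by
  intro n
  induction n with
  | zero =>
    intro cs h
    have : cs = [] := by cases cs <;> simp_all
    subst this; rfl
  | succ n ih =>
    intro cs h
    match cs with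
    | [] => rfl
    | [a] => simp [pieceB, chunkAt, wrapCore, List.range_succ]
    | [a, b] => simp [pieceB, chunkAt, wrapCore, List.range_succ]
    | a :: b :: c :: rest =>
      have hm : ((a :: b :: c :: rest).length + 2) / 3 = (rest.length + 2) / 3 + 1 := by
        simp only [List.length_cons]; omega
      have hlen : rest.length ≤ n := by
        simp only [List.length_cons] at h; omega
      rw [hm, List.range_succ_eq_map]
      simp only [List.map_cons, List.map_map, List.flatten_cons]
      have hp0 : pieceB (a :: b :: c :: rest) 0 = a :: b :: c :: "<br />".toList := by
        simp [pieceB, chunkAt]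
      have hps : (pieceB (a :: b :: c :: rest)) ∘ (fun k => k + 1) = pieceB rest := by
        funext k; simp [pieceB_succ]
      rw [hp0, hps, ih rest hlen]
      simp [wrapCore]

lemma range3_eq (nn : Nat) :
    PySem.List.pyRange 0 (nn : Int) 3 = (List.range ((nn + 2) / 3)).map (fun k => ((3 * k : Nat) : Int)) := by
  rw [PySem.List.pyRange_of_pos 0 nn (by norm_num)]
  by_cases h : (0 : Int) < nn
  · have harith : (((nn : Int) - 0 + 3 - 1) / 3).toNat = (nn + 2) / 3 := by omega
    simp only [if_pos h, harith]
    apply List.map_congr_left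
    intro k _
    push_cast; ring
  · have h0 : nn = 0 := by omega
    subst h0; simp

lemma sliceB_eq (cs : List Char) (k : Nat) :
    PySem.List.slice cs (some ((3 * k : Nat) : Int)) (some (((3 * k : Nat) : Int) + 3)) = chunkAt cs k := by
  have h3 : ((3 * k : Nat) : Int) + 3 = ((3 * k + 3 : Nat) : Int) := by push_cast; ring
  rw [h3, PySem.List.slice_natCast]
  simp [chunkAt, List.take_drop]

-- ===== VERDICT (by name: the statement is the Claim_ definition above) =====
theorem get_wrapped_spec : Claim_equal_get_wrapped := by
  intro name _
  unfold Spec_get_wrapped get_wrapped get_wrapped_alt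
  have h0 : List.range name.toList.length = List.range' ([] : List Char).length name.toList.length := by
    simp [List.range_eq_range']
  simp only [h0]
  have hf := foldA name.toList [] []
  simp only [List.nil_append] at hf
  rw [hf]
  apply String.toList_inj.mp
  rw [String.toList_join, String.toList_join]
  -- A side
  have hA : ((strsA name.toList ([] : List Char).length).map String.toList).flatten
      = wrapCore name.toList := by
    simpa [charsA] using charsA_eq_core name.toList.length name.toList (le_refl _) 0 (by norm_num)
  rw [hA]
  -- B side
  rw [range3_eq name.toList.length, List.map_map, List.map_map]
  have hmap : ∀ k : Nat, ((String.toList ∘ fun i =>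
      if ((PySem.List.slice name.toList (some i) (some (i + 3))).length == 3) = true then
        String.ofList (PySem.List.slice name.toList (some i) (some (i + 3))) ++ "<br />"
      else String.ofList (PySem.List.slice name.toList (some i) (some (i + 3)))) ∘
      (fun k : Nat => ((3 * k : Nat) : Int))) k = pieceB name.toList k := by
    intro k
    simp only [Function.comp_apply, sliceB_eq, pieceB]
    by_cases h : (chunkAt name.toList k).length == 3 <;>
      simp [h, String.toList_append, String.toList_ofList]
  rw [← piecesB_eq_core name.toList.length name.toList (le_refl _)]
  exact congrArg List.flatten (List.map_congr_left (fun k _ => (hmap k).symm))
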